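-- pv_equiv track=rewrite | github.com/cjipro/mil_streamlit | mil/publish/publish_v3.py | _replace_box3
-- ===== SOURCE A (Python) =====
-- def _replace_box3(html: str) -> str:
--     """
--     Replace V1's exec-alert-panel (Box 3) with a placeholder.
--     The placeholder is later substituted with the V3 exec summary box.
--     """
--     marker = '<!-- Right: Barclays Alert panel'
--     start_comment = html.find(marker)
--     if start_comment == -1:
--         cls_marker = 'class="topbar-box exec-alert-panel"'
--         cls_idx = html.find(cls_marker)
--         if cls_idx == -1:
--             return html
--         start_comment = html.rfind('<div', 0, cls_idx)
--
--     first_div = html.find('<div', start_comment)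
--     if first_div == -1:
--         return html
--
--     depth = 0
--     i = first_div
--     end_idx = first_div
--     while i < len(html):
--         if html[i:i+4] == '<div':
--             depth += 1
--             i += 4
--         elif html[i:i+6] == '</div>':
--             depth -= 1
--             if depth == 0:
--                 end_idx = i + 6
--                 break
--             i += 6
--         else:
--             i += 1
--
--     return html[:start_comment] + '<!-- V3-BOX3 -->' + html[end_idx:]
-- ===== SOURCE B (Python) =====
-- def _box3_span_start(html):
--     """Locate (start_comment, first_div) for Box 3, or None if absent."""
--     start_comment = html.find('<!-- Right: Barclays Alert panel')
--     if start_comment == -1: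
--         cls_idx = html.find('class="topbar-box exec-alert-panel"')
--         if cls_idx == -1:
--             return None
--         start_comment = html.rfind('<div', 0, cls_idx)
--     first_div = html.find('<div', start_comment)
--     if first_div == -1:
--         return None
--     return (start_comment, first_div)
--
--
-- def _div_tokens(html, i):
--     """All '<div' / '</div>' occurrences from i on, left to right, skipping
--     consumed characters; each as (end-offset-of-token, +1/-1)."""
--     toks = []
--     while i < len(html):
--         if html.startswith('<div', i):
--             toks.append((i + 4, 1))
--             i += 4
--         elif html.startswith('</div>', i):
--             toks.append((i + 6, -1))
--             i += 6
--         else: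
--             i += 1
--     return toks
--
--
-- def _balanced_end(toks):
--     """End offset of the token closing the first balanced group, or None."""
--     depth = 0
--     for e, d in toks:
--         depth += d
--         if d == -1 and depth == 0:
--             return e
--     return None
--
--
-- def _replace_box3(html: str) -> str:
--     """
--     Replace V1's exec-alert-panel (Box 3) with a placeholder.
--     Staged: locate the span start, tokenize the div tags once, then fold
--     over the token list to find the balanced end.
--     """
--     span = _box3_span_start(html)
--     if span is None:
--         return html
--     start_comment, first_div = span
--     e = _balanced_end(_div_tokens(html, first_div))
--     end_idx = first_div if e is None else e
--     return html[:start_comment] + '<!-- V3-BOX3 -->' + html[end_idx:]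
-- ===== Notes on version B (the rewrite author's own statement) =====
-- stated objective: alternative
-- what changed: A's fused char-by-char depth-counting loop is replaced by a staged decomposition: a helper locates the span start, a tokenizer pass collects all '<div'/'</div>' occurrences into a list, and a separate fold over that list tracks depth to find the balanced end.
import Mathlib
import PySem

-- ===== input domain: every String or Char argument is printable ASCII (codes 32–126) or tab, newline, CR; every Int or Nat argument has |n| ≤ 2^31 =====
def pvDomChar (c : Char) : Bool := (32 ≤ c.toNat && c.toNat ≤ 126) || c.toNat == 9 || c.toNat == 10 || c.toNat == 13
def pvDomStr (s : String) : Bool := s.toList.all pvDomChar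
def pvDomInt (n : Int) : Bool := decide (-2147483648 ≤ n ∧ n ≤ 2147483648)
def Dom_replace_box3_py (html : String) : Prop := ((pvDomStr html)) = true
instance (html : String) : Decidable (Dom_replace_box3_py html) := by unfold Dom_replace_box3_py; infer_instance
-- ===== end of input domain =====

-- B restructures A's fused char-by-char depth loop into staged passes: a span-start helper,
-- a tokenizer collecting '<div'/'</div>' occurrences, and a fold finding the balanced end.

def pvMarker : List Char := "<!-- Right: Barclays Alert panel".toList
def pvClsMarker : List Char := "class=\"topbar-box exec-alert-panel\"".toList
def pvDivTok : List Char := ['<', 'd', 'i', 'v']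
def pvCloseTok : List Char := ['<', '/', 'd', 'i', 'v', '>']
def pvPlaceholder : List Char := "<!-- V3-BOX3 -->".toList

-- ===== PORT A =====
-- A's while loop, char by char: `some e` = end_idx set to e and break; `none` = loop ran off the
-- end.  fuel is only a totality guard: each iteration advances i by ≥ 1 while i < s.length, so
-- fuel = s.length at entry (i ≥ 0) is never exhausted before the loop's own exit.
def pvALoop (s : List Char) (fuel : Nat) (i : Nat) (depth : Int) : Option Nat :=
  match fuel with
  | 0 => none
  | fuel + 1 =>
    if i < s.length then
      if PySem.List.slice s (some (i : Int)) (some ((i + 4 : Nat) : Int)) = pvDivTok then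
        pvALoop s fuel (i + 4) (depth + 1)
      else if PySem.List.slice s (some (i : Int)) (some ((i + 6 : Nat) : Int)) = pvCloseTok then
        if depth - 1 = 0 then some (i + 6) else pvALoop s fuel (i + 6) (depth - 1)
      else pvALoop s fuel (i + 1) depth
    else none

def replace_box3_py (html : String) : String :=
  let s := html.toList
  let start_comment0 := PySem.Chars.find s pvMarker
  let start_comment? : Option Int :=
    if start_comment0 = -1 then
      let cls_idx := PySem.Chars.find s pvClsMarker
      if cls_idx = -1 then none
      else some (PySem.Chars.rfindFrom s pvDivTok 0 (some cls_idx))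
    else some start_comment0
  match start_comment? with
  | none => html
  | some start_comment =>
    let first_div := PySem.Chars.findFrom s pvDivTok start_comment none
    if first_div = -1 then html
    else
      let end_idx := (pvALoop s s.length first_div.toNat 0).getD first_div.toNat
      String.ofList (PySem.List.slice s none (some start_comment) ++ pvPlaceholder
                  ++ PySem.List.slice s (some (end_idx : Int)) none)

-- ===== PORT B =====
-- _box3_span_start: the span-locating helper (None = one of the finds failed).
def pvSpanStart (s : List Char) : Option (Int × Nat) :=
  let start_comment0 := PySem.Chars.find s pvMarker
  let start_comment? : Option Int :=
    if start_comment0 = -1 then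
      let cls_idx := PySem.Chars.find s pvClsMarker
      if cls_idx = -1 then none
      else some (PySem.Chars.rfindFrom s pvDivTok 0 (some cls_idx))
    else some start_comment0
  match start_comment? with
  | none => none
  | some start_comment =>
    let first_div := PySem.Chars.findFrom s pvDivTok start_comment none
    if first_div = -1 then none else some (start_comment, first_div.toNat)

-- _div_tokens: tail recursion with an accumulator = the Python while loop appending to `toks`.
-- `html.startswith(tok, i)` is exactly `(s.drop i).take tok.length = tok`.
def pvDivTokens (s : List Char) (i : Nat) (acc : List (Nat × Int)) : List (Nat × Int) :=
  if i < s.length then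
    if (s.drop i).take 4 = pvDivTok then pvDivTokens s (i + 4) (acc ++ [(i + 4, 1)])
    else if (s.drop i).take 6 = pvCloseTok then pvDivTokens s (i + 6) (acc ++ [(i + 6, -1)])
    else pvDivTokens s (i + 1) acc
  else acc
termination_by s.length - i
decreasing_by all_goals omega

-- _balanced_end: fold over the token list tracking depth.
def pvBalancedEnd (toks : List (Nat × Int)) (depth : Int) : Option Nat :=
  match toks with
  | [] => none
  | (e, d) :: ts =>
    if d = -1 ∧ depth + d = 0 then some e else pvBalancedEnd ts (depth + d)

def replace_box3_py_alt (html : String) : String :=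
  let s := html.toList
  match pvSpanStart s with
  | none => html
  | some (start_comment, first_div) =>
    let e := pvBalancedEnd (pvDivTokens s first_div []) 0
    let end_idx := match e with | none => first_div | some e => e
    String.ofList (PySem.List.slice s none (some start_comment) ++ pvPlaceholder
                ++ PySem.List.slice s (some (end_idx : Int)) none)

-- ===== PRECONDITION & SPEC =====
def Spec_replace_box3_py (html : String) (out : String) : Prop := out = replace_box3_py_alt html
instance (html : String) (out : String) : Decidable (Spec_replace_box3_py html out) := by unfold Spec_replace_box3_py; infer_instance

-- ===== CLAIM =====
def Claim_equal_replace_box3_py : Prop := ∀ (html : String), Dom_replace_box3_py html → Spec_replace_box3_py html (replace_box3_py html)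

-- ===== LEMMAS AND PROOFS =====

-- slicing with Nat endpoints p, p+k is take k of drop p
theorem pvSlice_take (s : List Char) (p k : Nat) :
    PySem.List.slice s (some (p : Int)) (some ((p + k : Nat) : Int)) = (s.drop p).take k := by
  rw [PySem.List.slice_natCast]
  congr 1
  omega

-- pulling the accumulator out of the tokenizer
theorem pvDivTokens_acc (s : List Char) : ∀ (n i : Nat) (acc : List (Nat × Int)),
    s.length - i ≤ n → pvDivTokens s i acc = acc ++ pvDivTokens s i [] := by
  intro n
  induction n with
  | zero =>
    intro i acc h
    conv_lhs => rw [pvDivTokens]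
    conv_rhs => rw [pvDivTokens]
    rw [if_neg (by omega), if_neg (by omega)]
    simp
  | succ n ih =>
    intro i acc h
    by_cases hi : i < s.length
    case neg =>
      conv_lhs => rw [pvDivTokens]
      conv_rhs => rw [pvDivTokens]
      rw [if_neg hi, if_neg hi]
      simp
    case pos =>
    conv_lhs => rw [pvDivTokens]
    conv_rhs => rw [pvDivTokens]
    rw [if_pos hi, if_pos hi]
    split_ifs with h4 h6
    · rw [ih (i + 4) (acc ++ [(i + 4, 1)]) (by omega), List.nil_append,
        ih (i + 4) ([(i + 4, 1)]) (by omega)]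
      simp
    · rw [ih (i + 6) (acc ++ [(i + 6, -1)]) (by omega), List.nil_append,
        ih (i + 6) ([(i + 6, -1)]) (by omega)]
      simp
    · exact ih (i + 1) acc (by omega)

-- A's fused loop = B's tokenize-then-fold, from any position with enough fuel
theorem pvLoop_eq_tokens (s : List Char) : ∀ (fuel pos : Nat) (depth : Int),
    s.length ≤ fuel + pos →
    pvALoop s fuel pos depth = pvBalancedEnd (pvDivTokens s pos []) depth := by
  intro fuel
  induction fuel with
  | zero =>
    intro pos depth h
    conv_rhs => rw [pvDivTokens]
    rw [if_neg (by omega)]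
    rfl
  | succ fuel ih =>
    intro pos depth h
    by_cases hi : pos < s.length
    case neg =>
      conv_rhs => rw [pvDivTokens]
      rw [if_neg hi]
      show (if pos < s.length then _ else _) = _
      rw [if_neg hi]
      rfl
    case pos =>
    show (if pos < s.length then _ else _) = _
    rw [if_pos hi]
    simp only [pvSlice_take]
    conv_rhs => rw [pvDivTokens]
    rw [if_pos hi]
    split_ifs with h4 h6 hd
    · rw [List.nil_append, pvDivTokens_acc s s.length (pos + 4) ([(pos + 4, 1)]) (by omega)]
      show _ = pvBalancedEnd ((pos + 4, 1) :: pvDivTokens s (pos + 4) []) depth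
      rw [pvBalancedEnd]
      rw [if_neg (by rintro ⟨h1, -⟩; exact absurd h1 (by decide))]
      exact ih (pos + 4) (depth + 1) (by omega)
    · -- close token, depth reaches 0: both return pos + 6
      rw [List.nil_append, pvDivTokens_acc s s.length (pos + 6) ([(pos + 6, -1)]) (by omega)]
      show _ = pvBalancedEnd ((pos + 6, -1) :: pvDivTokens s (pos + 6) []) depth
      rw [pvBalancedEnd, if_pos ⟨rfl, by omega⟩]
    · -- close token, depth not yet 0
      rw [List.nil_append, pvDivTokens_acc s s.length (pos + 6) ([(pos + 6, -1)]) (by omega)]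
      show _ = pvBalancedEnd ((pos + 6, -1) :: pvDivTokens s (pos + 6) []) depth
      rw [pvBalancedEnd, if_neg (by rintro ⟨-, h2⟩; omega)]
      have hds : depth + -1 = depth - 1 := by ring
      rw [hds]
      exact ih (pos + 6) (depth - 1) (by omega)
    · exact ih (pos + 1) depth (by omega)

-- ===== VERDICT =====
theorem replace_box3_py_spec : Claim_equal_replace_box3_py := by
  intro html _
  unfold Spec_replace_box3_py replace_box3_py replace_box3_py_alt pvSpanStart
  by_cases h0 : PySem.Chars.find html.toList pvMarker = -1
  · by_cases h1 : PySem.Chars.find html.toList pvClsMarker = -1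
    · simp [h0, h1]
    · simp only [h0, h1, if_true, if_false]
      by_cases h2 : PySem.Chars.findFrom html.toList pvDivTok
          (PySem.Chars.rfindFrom html.toList pvDivTok 0
            (some (PySem.Chars.find html.toList pvClsMarker))) none = -1
      · simp [h2]
      · simp only [h2, if_false]
        rw [pvLoop_eq_tokens html.toList html.toList.length
          (PySem.Chars.findFrom html.toList pvDivTok _ none).toNat 0 (by omega)]
        cases pvBalancedEnd (pvDivTokens html.toList _ []) 0 <;> simp [Option.getD]
  · simp only [h0, if_false]
    by_cases h2 : PySem.Chars.findFrom html.toList pvDivTok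
        (PySem.Chars.find html.toList pvMarker) none = -1
    · simp [h2]
    · simp only [h2, if_false]
      rw [pvLoop_eq_tokens html.toList html.toList.length
        (PySem.Chars.findFrom html.toList pvDivTok _ none).toNat 0 (by omega)]
      cases pvBalancedEnd (pvDivTokens html.toList _ []) 0 <;> simp [Option.getD]
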